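-- pv_equiv track=rewrite | github.com/MrBrantCode/unitest_baseline | mut_generate/mist_train_cf/cf_88236/solution.py | get_numerical_value
-- ===== SOURCE A (Python) =====
-- def get_numerical_value(input_string):
--     prime_mapping = {
--         'a': 2, 'b': 3, 'c': 5, 'd': 7, 'e': 11, 'f': 13, 'g': 17, 'h': 19, 'i': 23, 'j': 29,
--         'k': 31, 'l': 37, 'm': 41, 'n': 43, 'o': 47, 'p': 53, 'q': 59, 'r': 61, 's': 67, 't': 71,
--         'u': 73, 'v': 79, 'w': 83, 'x': 89, 'y': 97, 'z': 101
--     }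
--
--     product = 1
--     for char in input_string:
--         if char.isalpha():
--             product *= prime_mapping[char.lower()]
--
--     return product % 1000000007
-- ===== SOURCE B (Python) =====
-- def get_numerical_value(input_string):
--     primes = [2, 3, 5, 7, 11, 13, 17, 19, 23, 29, 31, 37, 41, 43, 47, 53,
--               59, 61, 67, 71, 73, 79, 83, 89, 97, 101]
--     MOD = 1000000007
--     result = 1
--     for i in range(26):
--         lower = chr(97 + i)
--         upper = chr(65 + i)
--         count = 0
--         for ch in input_string:
--             if ch == lower or ch == upper:
--                 count += 1
--         result = result * pow(primes[i], count, MOD) % MOD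
--     return result
-- ===== Notes on version B (the rewrite author's own statement) =====
-- stated objective: faster
-- what changed: A makes one pass over the string multiplying a prime per alphabetic character into an unreduced big-integer product and takes the modulus once at the end; B loops over the 26 alphabet positions, counts each letter's occurrences (both cases) in the string, and multiplies one modular exponentiation pow(prime, count, M) per letter, reducing mod 1e9+7 as it goes, so intermediate numbers stay word-sized.
import Mathlib
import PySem

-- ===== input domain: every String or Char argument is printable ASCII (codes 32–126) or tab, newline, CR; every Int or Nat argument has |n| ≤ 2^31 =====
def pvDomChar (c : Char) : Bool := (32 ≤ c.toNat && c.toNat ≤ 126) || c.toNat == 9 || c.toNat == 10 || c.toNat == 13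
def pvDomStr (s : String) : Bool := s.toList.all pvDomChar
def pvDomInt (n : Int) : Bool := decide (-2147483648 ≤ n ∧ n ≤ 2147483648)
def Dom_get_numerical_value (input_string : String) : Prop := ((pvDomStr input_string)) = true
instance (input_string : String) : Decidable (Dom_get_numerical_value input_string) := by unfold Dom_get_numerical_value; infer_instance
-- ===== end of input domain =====

-- B iterates over the 26 alphabet positions, counts both cases of each letter in the
-- string, and multiplies one modular exponentiation per letter, reducing mod 1e9+7
-- throughout, instead of A's per-character multiply into an unreduced big product.

-- the dict literal prime_mapping of A, as a total table (0 on non a–z keys;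
-- on alphabetic ASCII input the key is always a–z, as in the Python)
def pvPrime : Char → Int
  | 'a' => 2 | 'b' => 3 | 'c' => 5 | 'd' => 7 | 'e' => 11 | 'f' => 13 | 'g' => 17 | 'h' => 19
  | 'i' => 23 | 'j' => 29 | 'k' => 31 | 'l' => 37 | 'm' => 41 | 'n' => 43 | 'o' => 47 | 'p' => 53
  | 'q' => 59 | 'r' => 61 | 's' => 67 | 't' => 71 | 'u' => 73 | 'v' => 79 | 'w' => 83 | 'x' => 89
  | 'y' => 97 | 'z' => 101 | _ => 0

-- ===== PORT A =====
def get_numerical_value (input_string : String) : Int :=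
  PySem.Int.mod
    (input_string.toList.foldl
      (fun product char =>
        if PySem.Chars.isalpha char then product * pvPrime (PySem.Chars.lowerChar char)
        else product)
      1)
    1000000007

-- ===== PORT B =====
-- the list literal 'primes' of Source B
def pvPrimes : List Int :=
  [2, 3, 5, 7, 11, 13, 17, 19, 23, 29, 31, 37, 41, 43, 47, 53,
   59, 61, 67, 71, 73, 79, 83, 89, 97, 101]

def get_numerical_value_alt (input_string : String) : Int :=
  (PySem.List.pyRange 0 26 1).foldl
    (fun result i =>
      let lower := Char.ofNat (97 + i).toNat   -- chr(97 + i); i ∈ [0,26) so exact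
      let upper := Char.ofNat (65 + i).toNat   -- chr(65 + i)
      let count : Int :=
        input_string.toList.foldl
          (fun count ch => if ch == lower || ch == upper then count + 1 else count) 0
      PySem.Int.mod
        (result * PySem.Int.powMod (PySem.List.pyGetD pvPrimes i 0) count.toNat 1000000007)
        1000000007)
    1

-- ===== PRECONDITION & SPEC =====
def Spec_get_numerical_value (input_string : String) (out : Int) : Prop := out = get_numerical_value_alt input_string
instance (input_string : String) (out : Int) : Decidable (Spec_get_numerical_value input_string out) := by unfold Spec_get_numerical_value; infer_instance

-- ===== CLAIM (what is proved, stated in full; the proofs are below) =====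
def Claim_equal_get_numerical_value : Prop := ∀ (input_string : String), Dom_get_numerical_value input_string → Spec_get_numerical_value input_string (get_numerical_value input_string)

-- ===== LEMMAS AND PROOFS =====

-- Char order/equality read on code points
lemma pvCharLe (a b : Char) : (a ≤ b) ↔ a.toNat ≤ b.toNat := by
  rw [Char.le_def, UInt32.le_iff_toNat_le]; rfl

lemma pvCharEqOfNat (ch : Char) (m : Nat) (hm : m < 55296) :
    (ch = Char.ofNat m) ↔ ch.toNat = m := by
  constructor
  · rintro rfl; simp [Char.toNat_ofNat, Nat.isValidChar, hm]
  · intro h; rw [← h, Char.ofNat_toNat]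

-- one character hits letter number i (lower or upper case) iff it is alphabetic
-- and lowers to that letter — for every Char, no domain assumption needed
lemma pvCharCase (i : Nat) (hi : i < 26) (ch : Char) :
    ((PySem.Chars.lowerChar ch == Char.ofNat (97 + i)) && PySem.Chars.isalpha ch)
      = (ch == Char.ofNat (97 + i) || ch == Char.ofNat (65 + i)) := by
  rw [Bool.eq_iff_iff]
  have hlo := pvCharEqOfNat ch (97 + i) (by omega)
  have hup := pvCharEqOfNat ch (65 + i) (by omega)
  simp only [PySem.Chars.isalpha, PySem.Chars.lowerChar, PySem.Chars.isupper,
    PySem.Chars.islower, Bool.and_eq_true, Bool.or_eq_true, beq_iff_eq,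
    decide_eq_true_eq, pvCharLe, hlo, hup]
  have h65 : ('A' : Char).toNat = 65 := by decide
  have h90 : ('Z' : Char).toNat = 90 := by decide
  have h97 : ('a' : Char).toNat = 97 := by decide
  have h122 : ('z' : Char).toNat = 122 := by decide
  rw [h65, h90, h97, h122]
  by_cases hU : 65 ≤ ch.toNat ∧ ch.toNat ≤ 90
  · rw [if_pos (by simp [hU.1, hU.2])]
    have : (Char.ofNat (ch.toNat + 32)).toNat = ch.toNat + 32 := by
      simp [Char.toNat_ofNat, Nat.isValidChar]; omega
    rw [pvCharEqOfNat _ (97 + i) (by omega), this]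
    omega
  · rw [if_neg (by simp; omega)]
    rw [hlo]
    omega

-- bumping one exponent in a product over distinct keys multiplies by that base
lemma pvBump (p : Char → Int) (c : Char) :
    ∀ (K : List Char), K.Nodup → c ∈ K → ∀ (cnt : Char → Nat),
      (K.map (fun k => p k ^ (cnt k + if k = c then 1 else 0))).prod
        = p c * (K.map (fun k => p k ^ cnt k)).prod := by
  intro K
  induction K with
  | nil => intro _ hc; exact absurd hc (List.not_mem_nil)
  | cons h K' ih =>
    intro hnd hc cnt
    rcases List.nodup_cons.mp hnd with ⟨hh, hnd'⟩
    by_cases hhc : h = c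
    · subst hhc
      have hrest : K'.map (fun k => p k ^ (cnt k + if k = h then 1 else 0))
          = K'.map (fun k => p k ^ cnt k) := by
        apply List.map_congr_left
        intro k hk
        have : k ≠ h := fun e => hh (e ▸ hk)
        simp [this]
      simp only [List.map_cons, List.prod_cons, hrest, if_true]
      rw [pow_succ]; ring
    · have hc' : c ∈ K' := by
        rcases List.mem_cons.mp hc with h1 | h1
        · exact absurd h1.symm hhc
        · exact h1
      simp only [List.map_cons, List.prod_cons, if_neg hhc, Nat.add_zero,
        ih hnd' hc' cnt]
      ring

-- a product of primes over a multiset equals the product over distinct keys with exponents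
lemma pvProdPow (p : Char → Int) :
    ∀ (t : List Char) (K : List Char), K.Nodup → (∀ c ∈ t, c ∈ K) →
      (K.map (fun k => p k ^ t.count k)).prod = (t.map p).prod := by
  intro t
  induction t with
  | nil =>
    intro K _ _
    simp
  | cons c t' ih =>
    intro K hnd hsub
    have hcK : c ∈ K := hsub c (List.mem_cons_self)
    have hcount : K.map (fun k => p k ^ List.count k (c :: t'))
        = K.map (fun k => p k ^ (t'.count k + if k = c then 1 else 0)) := by
      apply List.map_congr_left; intro k _
      rcases eq_or_ne k c with h | h
      · subst h; simp
      · simp [h, Ne.symm h]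
    rw [hcount, pvBump p c K hnd hcK,
      ih K hnd (fun x hx => hsub x (List.mem_cons_of_mem _ hx))]
    simp

-- the mod-as-you-go product fold
lemma pvFoldMod {α : Type} (f : α → Int) (M : Int) :
    ∀ (L : List α) (r : Int),
      L.foldl (fun a k => (a * (f k % M)) % M) (r % M) = (r * (L.map f).prod) % M := by
  intro L
  induction L with
  | nil => intro r; simp
  | cons k L' ih =>
    intro r
    have hstep : (r % M * (f k % M)) % M = (r * f k) % M := (Int.mul_emod r (f k) M).symm
    simp only [List.foldl_cons]
    rw [hstep, ih (r * f k), List.map_cons, List.prod_cons, mul_assoc]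

-- A's value: the plain product of primes over the lowered alphabetic characters, then mod
lemma pvA_eq (s : String) :
    get_numerical_value s
      = (((s.toList.filter PySem.Chars.isalpha).map PySem.Chars.lowerChar).map pvPrime).prod
          % 1000000007 := by
  unfold get_numerical_value
  rw [PySem.Int.mod_eq_emod_of_pos (by norm_num : (0:Int) < 1000000007),
    PySem.List.foldl_if_eq_foldl_filter]
  rw [← List.foldl_map (f := PySem.Chars.lowerChar) (g := fun (a : Int) c => a * pvPrime c),
    ← List.foldl_map (f := pvPrime) (g := fun (a b : Int) => a * b),
    ← List.prod_eq_foldl]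

-- the letter-indexed facts of B's loop body at each position k < 26
lemma pvIdx (k : Nat) (hk : k < 26) :
    PySem.List.pyGetD pvPrimes ((k : Int)) 0 = pvPrime (Char.ofNat (97 + k))
      ∧ ((97 : Int) + (k : Int)).toNat = 97 + k
      ∧ ((65 : Int) + (k : Int)).toNat = 65 + k := by
  refine ⟨?_, by omega, by omega⟩
  rw [PySem.List.pyGetD_natCast]
  interval_cases k <;> decide

-- B's count loop counts exactly the occurrences of letter k in the lowered filtered list
lemma pvCount_eq (s : String) (k : Nat) (hk : k < 26) :
    s.toList.foldl
        (fun count ch =>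
          if ch == Char.ofNat (97 + k) || ch == Char.ofNat (65 + k) then count + 1 else count) 0
      = (((s.toList.filter PySem.Chars.isalpha).map PySem.Chars.lowerChar).count
          (Char.ofNat (97 + k)) : Int) := by
  rw [PySem.List.foldl_if_add_one
      (fun ch => ch == Char.ofNat (97 + k) || ch == Char.ofNat (65 + k)) s.toList 0,
    zero_add, List.count_eq_countP, List.countP_map, List.countP_filter]
  congr 1
  apply List.countP_congr
  intro ch _
  simp only [Function.comp]
  rw [pvCharCase k hk ch]

-- B's value: product over the 26 letters of prime^count, mod as you go
lemma pvB_eq (s : String) :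
    get_numerical_value_alt s
      = ((List.range 26).map
          (fun k => pvPrime (Char.ofNat (97 + k))
            ^ (((s.toList.filter PySem.Chars.isalpha).map PySem.Chars.lowerChar).count
                (Char.ofNat (97 + k))))).prod
        % 1000000007 := by
  unfold get_numerical_value_alt
  set t := (s.toList.filter PySem.Chars.isalpha).map PySem.Chars.lowerChar with ht
  rw [PySem.List.pyRange_of_pos 0 26 (by norm_num : (0:Int) < 1),
    if_pos (by norm_num : (0:Int) < 26),
    show (((26:Int) - 0 + 1 - 1) / 1).toNat = 26 from by decide,
    List.foldl_map]
  rw [PySem.List.foldl_congr_mem (List.range 26) _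
      (fun (result : Int) (k : Nat) =>
        (result * ((pvPrime (Char.ofNat (97 + k)) ^ t.count (Char.ofNat (97 + k)))
            % 1000000007)) % 1000000007) 1
      ?_]
  · rw [show (1 : Int) = 1 % 1000000007 from rfl,
      pvFoldMod (fun k => pvPrime (Char.ofNat (97 + k)) ^ t.count (Char.ofNat (97 + k)))
        1000000007 (List.range 26) 1, one_mul]
  · intro acc k hk
    have hk26 : k < 26 := List.mem_range.mp hk
    obtain ⟨hget, hlo, hup⟩ := pvIdx k hk26
    simp only [zero_add, one_mul]
    rw [hlo, hup, hget, pvCount_eq s k hk26, Int.toNat_natCast,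
      PySem.Int.powMod_eq_emod _ _ (by norm_num : (0:Int) < 1000000007),
      PySem.Int.mod_eq_emod_of_pos (by norm_num : (0:Int) < 1000000007), ← ht]

-- ===== VERDICT (by name: the statement is the Claim_ definition above) =====
theorem get_numerical_value_spec : Claim_equal_get_numerical_value := by
  intro s _
  unfold Spec_get_numerical_value
  rw [pvA_eq, pvB_eq]
  set t := (s.toList.filter PySem.Chars.isalpha).map PySem.Chars.lowerChar with ht
  rw [show ((List.range 26).map
        (fun k => pvPrime (Char.ofNat (97 + k)) ^ t.count (Char.ofNat (97 + k))))
      = (((List.range 26).map (fun k => Char.ofNat (97 + k))).map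
        (fun c => pvPrime c ^ t.count c)) from by rw [List.map_map]; rfl]
  rw [pvProdPow pvPrime t ((List.range 26).map (fun k => Char.ofNat (97 + k)))
      (by decide) ?_]
  intro c hc
  rw [ht] at hc
  rcases List.mem_map.mp hc with ⟨ch, hch, rfl⟩
  have hrange : 97 ≤ (PySem.Chars.lowerChar ch).toNat ∧ (PySem.Chars.lowerChar ch).toNat ≤ 122 := by
    have halpha : PySem.Chars.isalpha ch = true := (List.mem_filter.mp hch).2
    simp only [PySem.Chars.isalpha, PySem.Chars.isupper, PySem.Chars.islower,
      Bool.or_eq_true, Bool.and_eq_true, decide_eq_true_eq, pvCharLe] at halpha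
    have h65 : ('A' : Char).toNat = 65 := by decide
    have h90 : ('Z' : Char).toNat = 90 := by decide
    have h97 : ('a' : Char).toNat = 97 := by decide
    have h122 : ('z' : Char).toNat = 122 := by decide
    rw [h65, h90, h97, h122] at halpha
    unfold PySem.Chars.lowerChar PySem.Chars.isupper
    by_cases hU : 65 ≤ ch.toNat ∧ ch.toNat ≤ 90
    · rw [if_pos (by simp [pvCharLe, h65, h90, hU.1, hU.2])]
      have : (Char.ofNat (ch.toNat + 32)).toNat = ch.toNat + 32 := by
        simp [Char.toNat_ofNat, Nat.isValidChar]; omega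
      omega
    · rw [if_neg (by simp [pvCharLe, h65, h90]; omega)]
      omega
  apply List.mem_map.mpr
  refine ⟨(PySem.Chars.lowerChar ch).toNat - 97, List.mem_range.mpr (by omega), ?_⟩
  rw [show 97 + ((PySem.Chars.lowerChar ch).toNat - 97) = (PySem.Chars.lowerChar ch).toNat by omega,
    Char.ofNat_toNat]
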